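-- pv_equiv track=rewrite | github.com/damsleth/owa-graph | owa_graph/emit.py | _join_continuation
-- ===== SOURCE A (Python) =====
-- _FLAG_TOKENS = frozenset({
--     '-s', '-sS', '-X', '-H',
--     '--data', '--method', '--uri', '--headers', '--body',
-- })
--
-- def _join_continuation(parts):
--     """Pretty-print a long argv as a multi-line command.
--
--     Strategy: keep the program name, any leading non-flag positional
--     tokens, and the *first* flag (with its value) on line 1. Each
--     subsequent flag (with its value) goes on its own continuation line.
--     Trailing positional tokens (e.g. the curl URL) attach to whatever
--     chunk they follow.
--     """
--     if len(parts) <= 4: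
--         return ' '.join(parts)
--
--     chunks = []
--     current = []
--     seen_first_flag = False
--     i = 0
--     while i < len(parts):
--         tok = parts[i]
--         if tok in _FLAG_TOKENS:
--             if seen_first_flag:
--                 if current:
--                     chunks.append(current)
--                 current = [tok]
--             else:
--                 current.append(tok)
--                 seen_first_flag = True
--             # Consume the value if next token is not itself a flag.
--             if i + 1 < len(parts) and parts[i + 1] not in _FLAG_TOKENS:
--                 current.append(parts[i + 1])
--                 i += 2
--                 continue
--             i += 1
--             continue
--         current.append(tok)
--         i += 1
--     if current:
--         chunks.append(current)
--
--     if len(chunks) <= 1: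
--         return ' '.join(parts)
--     head = ' '.join(chunks[0])
--     rest = ['  ' + ' '.join(c) for c in chunks[1:]]
--     return ' \\\n'.join([head] + rest)
-- ===== SOURCE B (Python) =====
-- _FLAG_TOKENS = frozenset({
--     '-s', '-sS', '-X', '-H',
--     '--data', '--method', '--uri', '--headers', '--body',
-- })
--
-- def _join_continuation(parts):
--     """Two-phase: collect flag positions, then slice at every flag after the first."""
--     flags = [i for i, tok in enumerate(parts) if tok in _FLAG_TOKENS]
--     if len(parts) <= 4 or len(flags) < 2:
--         return ' '.join(parts)
--     bounds = flags[1:] + [len(parts)]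
--     head = ' '.join(parts[:bounds[0]])
--     rest = ['  ' + ' '.join(parts[a:b]) for a, b in zip(bounds, bounds[1:])]
--     return ' \\\n'.join([head] + rest)
-- ===== Notes on version B (the rewrite author's own statement) =====
-- stated objective: simpler
-- what changed: Replaces A's single-pass state machine (current chunk, seen-first-flag, explicit value-consumption with i+=2) by a two-phase decomposition: collect flag indices, then slice the list at each flag after the first; the value-consuming branch disappears because it never changes chunk assignment.
import Mathlib
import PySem

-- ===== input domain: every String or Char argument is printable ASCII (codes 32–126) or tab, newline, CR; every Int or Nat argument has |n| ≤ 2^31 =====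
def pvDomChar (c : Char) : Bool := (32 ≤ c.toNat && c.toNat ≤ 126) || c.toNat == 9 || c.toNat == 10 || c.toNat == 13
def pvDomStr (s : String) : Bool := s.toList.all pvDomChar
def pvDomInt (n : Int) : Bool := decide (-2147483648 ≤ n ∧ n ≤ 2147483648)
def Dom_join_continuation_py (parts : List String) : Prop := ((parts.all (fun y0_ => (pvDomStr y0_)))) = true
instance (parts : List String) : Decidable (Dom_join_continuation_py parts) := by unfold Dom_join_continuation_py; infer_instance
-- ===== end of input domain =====

-- B replaces A's one-pass chunking state machine by collecting flag indices and slicing at each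
-- flag after the first (objective: simpler decomposition; same output on every input).

-- ===== PORT A =====
-- the module constant _FLAG_TOKENS (a literal frozenset used only for membership tests;
-- its elements are distinct, so list membership is exact)
def flagTokens : List String :=
  ["-s", "-sS", "-X", "-H", "--data", "--method", "--uri", "--headers", "--body"]

-- the while-loop of A: state (chunks, current, seen_first_flag, i); returns (chunks, current)
def aLoop (parts : List String) (i : Nat) (chunks : List (List String))
    (current : List String) (seen : Bool) : List (List String) × List String :=
  if h : i < parts.length then
    let tok := parts[i]
    if flagTokens.contains tok then
      let chunks' := if seen then (if current ≠ [] then chunks ++ [current] else chunks) else chunks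
      let current' := if seen then [tok] else current ++ [tok]
      -- "if i + 1 < len(parts) and parts[i+1] not in _FLAG_TOKENS: consume value, i += 2"
      if h2 : i + 1 < parts.length then
        if flagTokens.contains parts[i + 1] then
          aLoop parts (i + 1) chunks' current' true
        else
          aLoop parts (i + 2) chunks' (current' ++ [parts[i + 1]]) true
      else
        aLoop parts (i + 1) chunks' current' true
    else
      aLoop parts (i + 1) chunks (current ++ [tok]) seen
  else
    (chunks, current)
termination_by parts.length - i
decreasing_by all_goals omega

def join_continuation_py (parts : List String) : String :=
  if parts.length ≤ 4 then PySem.Str.join " " parts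
  else
    let pr := aLoop parts 0 [] [] false
    let chunks := if pr.2 ≠ [] then pr.1 ++ [pr.2] else pr.1
    if chunks.length ≤ 1 then PySem.Str.join " " parts
    else
      -- chunks[0] (guarded: chunks has ≥ 2 elements here)
      let head := PySem.Str.join " " (chunks.headD [])
      let rest := (chunks.drop 1).map (fun c => "  " ++ PySem.Str.join " " c)
      PySem.Str.join " \\\n" (head :: rest)

-- ===== PORT B =====
def join_continuation_py_alt (parts : List String) : String :=
  let flags := ((PySem.List.enumerate parts).filter (fun p => flagTokens.contains p.2)).map (fun p => p.1)
  if parts.length ≤ 4 ∨ flags.length < 2 then PySem.Str.join " " parts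
  else
    let bounds : List Int := flags.drop 1 ++ [(parts.length : Int)]
    -- bounds[0] (guarded: bounds is nonempty here)
    let head := PySem.Str.join " " (PySem.List.slice parts none (some (bounds.headD 0)))
    let rest := (bounds.zip (bounds.drop 1)).map
      (fun ab => "  " ++ PySem.Str.join " " (PySem.List.slice parts (some ab.1) (some ab.2)))
    PySem.Str.join " \\\n" (head :: rest)

-- ===== PRECONDITION & SPEC =====
def Spec_join_continuation_py (parts : List String) (out : String) : Prop := out = join_continuation_py_alt parts
instance (parts : List String) (out : String) : Decidable (Spec_join_continuation_py parts out) := by unfold Spec_join_continuation_py; infer_instance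

-- ===== CLAIM (what is proved, stated in full; the proofs are below) =====
def Claim_equal_join_continuation_py : Prop := ∀ (parts : List String), Dom_join_continuation_py parts → Spec_join_continuation_py parts (join_continuation_py parts)

-- ===== LEMMAS AND PROOFS =====

-- proof-side characterisation of A's loop: structural chunking over the remaining tokens
def chunksF : List String → Bool → List String → List (List String)
  | [], _, cur => if cur = [] then [] else [cur]
  | t :: ts, seen, cur =>
    if flagTokens.contains t then
      if seen then
        if cur = [] then chunksF ts true [t] else cur :: chunksF ts true [t]
      else chunksF ts true (cur ++ [t])
    else chunksF ts seen (cur ++ [t])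

-- once the first flag was seen: split before every further flag
def splitTail : List String → List String → List (List String)
  | [], cur => [cur]
  | t :: ts, cur =>
    if flagTokens.contains t then cur :: splitTail ts [t] else splitTail ts (cur ++ [t])

-- indices of flag tokens
def flagIdx : List String → List Nat
  | [] => []
  | t :: ts =>
    if flagTokens.contains t then 0 :: (flagIdx ts).map (· + 1) else (flagIdx ts).map (· + 1)

-- slices of p at cut points cs (each chunk runs to the next cut or the end)
def slicesAt (p : List String) : List Nat → List (List String)
  | [] => []
  | c :: cs => (p.drop c).take (cs.headD p.length - c) :: slicesAt p cs

theorem chunksF_true : ∀ (ts cur : List String), cur ≠ [] → chunksF ts true cur = splitTail ts cur := by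
  intro ts
  induction ts with
  | nil => intro cur h; simp [chunksF, splitTail, h]
  | cons t ts ih =>
    intro cur h
    by_cases hf : flagTokens.contains t = true
    · simp only [chunksF, splitTail, hf, if_pos, if_true, h]
      rw [ih [t] (by simp)]
      simp [h]
    · simp only [chunksF, splitTail, hf, if_neg, if_false, Bool.false_eq_true, not_false_iff]
      exact ih (cur ++ [t]) (by simp)

theorem slicesAt_cons_map (x : String) (xs : List String) :
    ∀ cs : List Nat, slicesAt (x :: xs) (cs.map (· + 1)) = slicesAt xs cs := by
  intro cs
  induction cs with
  | nil => simp [slicesAt]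
  | cons c cs ih =>
    simp only [List.map_cons, slicesAt, ih, List.drop_succ_cons]
    congr 1
    cases cs <;> simp [Nat.succ_sub_succ]

theorem headD_map_succ (g : List Nat) (d : Nat) :
    (g.map (· + 1)).headD (d + 1) = g.headD d + 1 := by
  cases g <;> simp

theorem splitTail_eq : ∀ (ts cur : List String),
    splitTail ts cur
      = (cur ++ ts.take ((flagIdx ts).headD ts.length)) :: slicesAt ts (flagIdx ts) := by
  intro ts
  induction ts with
  | nil => intro cur; simp [splitTail, flagIdx, slicesAt]
  | cons t ts ih =>
    intro cur
    by_cases hf : flagTokens.contains t = true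
    · simp only [splitTail, flagIdx, hf, if_pos, if_true]
      rw [ih [t]]
      simp only [List.headD_cons, List.take_zero, List.append_nil, slicesAt, List.drop_zero,
        Nat.sub_zero, slicesAt_cons_map, List.length_cons]
      rw [headD_map_succ, List.take_succ_cons]
      rfl
    · simp only [splitTail, flagIdx, hf, if_neg, if_false, Bool.false_eq_true, not_false_iff]
      rw [ih (cur ++ [t]), slicesAt_cons_map]
      simp only [List.length_cons]
      rw [headD_map_succ, List.take_succ_cons]
      simp

theorem chunksF_false_eq : ∀ (p cur : List String),
    chunksF p false cur
      = match flagIdx p with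
        | [] => if cur ++ p = [] then [] else [cur ++ p]
        | [_] => [cur ++ p]
        | _ :: f1 :: fs => (cur ++ p.take f1) :: slicesAt p (f1 :: fs) := by
  intro p
  induction p with
  | nil => intro cur; simp [chunksF, flagIdx]
  | cons t ts ih =>
    intro cur
    by_cases hf : flagTokens.contains t = true
    · simp only [chunksF, flagIdx, hf, if_pos, Bool.false_eq_true, if_false]
      rw [chunksF_true ts (cur ++ [t]) (by simp), splitTail_eq]
      cases hg : flagIdx ts with
      | nil => simp [hg, slicesAt]
      | cons g0 gs =>
        simp only [List.map_cons, List.headD_cons, slicesAt, List.drop_zero, Nat.sub_zero,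
          List.length_cons, slicesAt_cons_map]
        rw [List.take_succ_cons]
        cases hgs : gs with
        | nil =>
          simp only [hg, hgs, slicesAt] at *
          simp
        | cons g1 gs' => simp [slicesAt, List.take_succ_cons]
    · simp only [chunksF, flagIdx, hf, Bool.false_eq_true, if_false, if_neg]
      rw [ih (cur ++ [t])]
      cases hg : flagIdx ts with
      | nil => simp
      | cons g0 gs =>
        cases gs with
        | nil => simp
        | cons g1 gs' =>
          simp only [List.map_cons, List.take_succ_cons]
          have hm := slicesAt_cons_map t ts (g1 :: gs')
          simp only [List.map_cons] at hm
          simp [hm]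

theorem flags_eq : ∀ (ts : List String) (s : Int),
    ((PySem.List.enumerate ts s).filter (fun p => flagTokens.contains p.2)).map (fun p => p.1)
      = (flagIdx ts).map (fun k : Nat => s + (k : Int)) := by
  intro ts
  induction ts with
  | nil => intro s; simp [PySem.List.enumerate_nil, flagIdx]
  | cons t ts ih =>
    intro s
    rw [PySem.List.enumerate_cons, flagIdx]
    have hfun : (flagIdx ts).map ((fun k : Nat => s + (k : Int)) ∘ (· + 1))
        = (flagIdx ts).map (fun k : Nat => s + 1 + (k : Int)) := by
      apply List.map_congr_left
      intro k _
      simp [Function.comp]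
      push_cast
      ring
    by_cases hf : flagTokens.contains t = true
    · simp only [List.filter_cons, hf, decide_true, if_pos, List.map_cons, ih]
      rw [List.map_map, hfun]
      simp
    · simp only [List.filter_cons, hf, decide_false, Bool.false_eq_true, if_false, ih]
      rw [List.map_map, hfun]

theorem pairsAux (p : List String) : ∀ (cs : List Nat) (c : Nat),
    (((c :: (cs ++ [p.length])).map (fun k : Nat => (k : Int))).zip
        ((cs ++ [p.length]).map (fun k : Nat => (k : Int)))).map
      (fun ab => PySem.List.slice p (some ab.1) (some ab.2))
      = slicesAt p (c :: cs) := by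
  intro cs
  induction cs with
  | nil => intro c; simp [slicesAt, PySem.List.slice_natCast]
  | cons c1 cs' ih =>
    intro c
    simp only [List.cons_append, List.map_cons, List.zip_cons_cons, List.map_cons]
    have htail := ih c1
    simp only [List.cons_append, List.map_cons] at htail
    rw [htail]
    simp [slicesAt, PySem.List.slice_natCast]

theorem pairs_eq (p : List String) : ∀ cs : List Nat,
    (((cs ++ [p.length]).map (fun k : Nat => (k : Int))).zip
        (((cs ++ [p.length]).map (fun k : Nat => (k : Int))).drop 1)).map
      (fun ab => PySem.List.slice p (some ab.1) (some ab.2))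
      = slicesAt p cs := by
  intro cs
  cases cs with
  | nil => simp [slicesAt]
  | cons c cs =>
    have h := pairsAux p cs c
    simp only [List.cons_append, List.map_cons, List.drop_succ_cons, List.drop_zero] at h ⊢
    exact h

theorem flag_step (rest cur : List String) (ch : List (List String)) (seen : Bool) (tok : String)
    (hf : flagTokens.contains tok = true) :
    (if seen then (if cur ≠ [] then ch ++ [cur] else ch) else ch)
        ++ chunksF rest true (if seen then [tok] else cur ++ [tok])
      = ch ++ chunksF (tok :: rest) seen cur := by
  have hm : tok ∈ flagTokens := by simpa using hf
  cases seen with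
  | false => simp [chunksF, hm]
  | true =>
    by_cases hc : cur = []
    · simp [chunksF, hm, hc]
    · simp [chunksF, hm, hc]

theorem aLoop_post (parts : List String) :
    ∀ n i chunks cur seen, parts.length - i ≤ n →
      (if (aLoop parts i chunks cur seen).2 ≠ [] then
          (aLoop parts i chunks cur seen).1 ++ [(aLoop parts i chunks cur seen).2]
        else (aLoop parts i chunks cur seen).1)
        = chunks ++ chunksF (parts.drop i) seen cur := by
  intro n
  induction n with
  | zero =>
    intro i ch cur seen h
    have hi : ¬ i < parts.length := by omega
    rw [aLoop]
    simp only [dif_neg hi]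
    rw [List.drop_eq_nil_of_le (by omega)]
    by_cases hc : cur = [] <;> simp [chunksF, hc]
  | succ n ih =>
    intro i ch cur seen h
    by_cases hi : i < parts.length
    · rw [aLoop]
      simp only [dif_pos hi]
      have hdrop : parts.drop i = parts[i] :: parts.drop (i + 1) :=
        List.drop_eq_getElem_cons hi
      by_cases hf : flagTokens.contains parts[i] = true
      · simp only [hf, if_pos]
        by_cases h2 : i + 1 < parts.length
        · simp only [dif_pos h2]
          have hdrop2 : parts.drop (i + 1) = parts[i + 1] :: parts.drop (i + 2) :=
            List.drop_eq_getElem_cons h2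
          by_cases hf2 : flagTokens.contains parts[i + 1] = true
          · simp only [hf2, if_pos]
            rw [ih (i + 1) _ _ _ (by omega), hdrop, ← flag_step _ _ _ _ _ hf]
          · simp only [hf2, Bool.false_eq_true, if_false]
            rw [ih (i + 2) _ _ _ (by omega), hdrop, ← flag_step _ _ _ _ _ hf]
            have : chunksF (parts.drop (i + 1)) true (if seen then [parts[i]] else cur ++ [parts[i]])
                = chunksF (parts.drop (i + 2)) true
                    ((if seen then [parts[i]] else cur ++ [parts[i]]) ++ [parts[i + 1]]) := by
              rw [hdrop2, chunksF]
              simp [show parts[i + 1] ∉ flagTokens by simpa using hf2]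
            rw [this]
        · simp only [dif_neg h2]
          rw [ih (i + 1) _ _ _ (by omega), hdrop, ← flag_step _ _ _ _ _ hf]
      · simp only [hf, Bool.false_eq_true, if_false]
        rw [ih (i + 1) _ _ _ (by omega), hdrop]
        rw [chunksF]
        simp [show parts[i] ∉ flagTokens by simpa using hf]
    · rw [aLoop]
      simp only [dif_neg hi]
      rw [List.drop_eq_nil_of_le (by omega)]
      by_cases hc : cur = [] <;> simp [chunksF, hc]

theorem slicesAt_length (p : List String) : ∀ cs : List Nat, (slicesAt p cs).length = cs.length := by
  intro cs; induction cs with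
  | nil => simp [slicesAt]
  | cons c cs ih => simp [slicesAt, ih]

-- ===== VERDICT (by name: the statement is the Claim_ definition above) =====
theorem join_continuation_py_spec : Claim_equal_join_continuation_py := by
  intro parts _
  unfold Spec_join_continuation_py
  simp only [join_continuation_py, join_continuation_py_alt]
  by_cases h4 : parts.length ≤ 4
  · simp [h4]
  · have hpost := aLoop_post parts parts.length 0 [] [] false (by omega)
    simp only [List.drop_zero, List.nil_append] at hpost
    rw [chunksF_false_eq] at hpost
    have hflags := flags_eq parts 0
    have hz : (fun k : Nat => (0 : Int) + (k : Int)) = (fun k : Nat => (k : Int)) := by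
      funext k; ring
    rw [hz] at hflags
    simp only [h4, if_false, hflags, hpost]
    cases hg : flagIdx parts with
    | nil =>
      have hne : parts ≠ [] := by intro h0; rw [h0] at h4; simp at h4
      simp [hg, hne, h4]
    | cons f0 gs =>
      cases hgs : gs with
      | nil => simp [hg, hgs, h4]
      | cons f1 fs =>
        dsimp only
        simp only [List.nil_append]
        have hbounds : ((f0 :: f1 :: fs).map (fun k : Nat => (k : Int))).drop 1 ++ [(parts.length : Int)]
            = ((f1 :: fs) ++ [parts.length]).map (fun k : Nat => (k : Int)) := by
          simp
        have hcomp : (fun ab : Int × Int => "  " ++ PySem.Str.join " " (PySem.List.slice parts (some ab.1) (some ab.2)))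
            = (fun c => "  " ++ PySem.Str.join " " c) ∘ (fun ab : Int × Int => PySem.List.slice parts (some ab.1) (some ab.2)) := rfl
        have hA : ¬ ((List.take f1 parts :: slicesAt parts (f1 :: fs)).length ≤ 1) := by
          have := slicesAt_length parts (f1 :: fs)
          simp [this]
        have hB : ¬ (parts.length ≤ 4 ∨ ((f0 :: f1 :: fs).map (fun k : Nat => (k : Int))).length < 2) := by
          simp [h4]
        simp only [hA, if_false, hB, if_neg, not_false_iff]
        rw [hbounds, hcomp, ← List.map_map, pairs_eq]
        simp only [List.map_cons, List.cons_append, List.headD_cons]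
        rw [PySem.List.slice_to_natCast]
        simp
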